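-- pv_equiv track=rewrite | github.com/1frag/py_search_deps | py_search_deps.py | remove_type_checking
-- ===== SOURCE A (Python) =====
-- from itertools import chain
--
-- def remove_type_checking(text: str):
--     if 'TYPE_CHECKING' not in text:
--         return text
--
--     def inner():
--         it = chain(text.split('\n'), [None])
--         while (line := next(it)) is not None:
--             if line == 'if TYPE_CHECKING:':
--                 while (line := next(it)) is not None:
--                     if line and line[0] != ' ':
--                         yield line
--                         break
--             else:
--                 yield line
--
--     return '\n'.join(inner())
-- ===== SOURCE B (Python) =====
-- def _strip(lines):
--     # find the first guard line; no guard left -> keep everything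
--     try:
--         j = lines.index('if TYPE_CHECKING:')
--     except ValueError:
--         return lines
--     rest = lines[j + 1:]
--     k = 0
--     while k < len(rest) and (not rest[k] or rest[k][0] == ' '):
--         k += 1
--     if k == len(rest):
--         return lines[:j]
--     return lines[:j] + [rest[k]] + _strip(rest[k + 1:])
--
--
-- def remove_type_checking(text: str):
--     if 'TYPE_CHECKING' not in text:
--         return text
--     return '\n'.join(_strip(text.split('\n')))
-- ===== Notes on version B (the rewrite author's own statement) =====
-- stated objective: alternative
-- what changed: Replaces A's streaming generator state machine by a recursive search-and-splice: list.index locates the next guard line, a scan measures the indented block, and the result is built from list slices with recursion on the remainder.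
-- outside the precondition, e.g. on remove_type_checking('if TYPE_CHECKING:'): A raises RuntimeError, B returns ''
import Mathlib
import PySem

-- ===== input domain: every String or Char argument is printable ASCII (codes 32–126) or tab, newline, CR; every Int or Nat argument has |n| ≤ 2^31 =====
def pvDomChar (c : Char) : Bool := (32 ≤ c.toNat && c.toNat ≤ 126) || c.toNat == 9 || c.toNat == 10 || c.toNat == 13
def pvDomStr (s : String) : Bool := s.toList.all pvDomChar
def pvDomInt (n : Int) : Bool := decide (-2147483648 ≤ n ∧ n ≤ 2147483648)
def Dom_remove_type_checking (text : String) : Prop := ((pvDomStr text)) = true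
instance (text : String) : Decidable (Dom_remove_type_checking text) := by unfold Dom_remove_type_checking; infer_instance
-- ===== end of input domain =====

-- ===== PORT A =====
-- B replaces A's streaming generator by a recursive index-search-and-splice over the line list (objective: alternative).
-- A raises RuntimeError (generator raised StopIteration) when a TYPE_CHECKING block runs to end-of-file;
-- those inputs are outside Pre_ and B returns the text with the unterminated block dropped there.

-- the guard line both versions compare against
def pvGuard : List Char := "if TYPE_CHECKING:".toList

mutual
-- outer `while` of A's generator `inner`
def pvAOuter : List (List Char) → List (List Char)
  | [] => []
  | l :: rest => if l = pvGuard then pvASkip rest else l :: pvAOuter rest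
-- inner `while` of A's generator (skipping the block; `yield line; break` on a dedented line)
def pvASkip : List (List Char) → List (List Char)
  | [] => []   -- Python raises here (StopIteration → RuntimeError); outside Pre_
  | l :: rest => if l ≠ [] ∧ PySem.List.pyGet? l 0 ≠ some ' ' then l :: pvAOuter rest else pvASkip rest
end

def remove_type_checking (text : String) : String :=
  if PySem.Str.isIn "TYPE_CHECKING" text = false then text
  else String.ofList (PySem.Chars.join ['\n'] (pvAOuter (PySem.Chars.splitOn text.toList ['\n'])))

-- ===== PORT B =====
-- Source B's `while k < len(rest) and (not rest[k] or rest[k][0] == ' ')` scan: length of the indented block at the front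
def pvBlockLen : List (List Char) → Nat
  | [] => 0
  | l :: rest => if l = [] ∨ PySem.List.pyGet? l 0 = some ' ' then pvBlockLen rest + 1 else 0

-- Source B's `_strip`: locate the first guard with list.index, splice slices, recurse on the remainder
def pvBStrip (lines : List (List Char)) : List (List Char) :=
  match h : PySem.List.index? lines pvGuard with
  | none => lines
  | some j =>
    let rest := lines.drop (j + 1)
    let k := pvBlockLen rest
    if k = rest.length then lines.take j
    else lines.take j ++ [rest.getD k []] ++ pvBStrip (rest.drop (k + 1))
termination_by lines.length
decreasing_by
  have hmem : pvGuard ∈ lines := (PySem.List.index?_isSome_iff _ _).mp (by rw [h]; rfl)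
  have hpos : 0 < lines.length := List.length_pos_of_mem hmem
  simp only [List.length_drop]
  omega

def remove_type_checking_alt (text : String) : String :=
  if PySem.Str.isIn "TYPE_CHECKING" text = false then text
  else String.ofList (PySem.Chars.join ['\n'] (pvBStrip (PySem.Chars.splitOn text.toList ['\n'])))

-- ===== PRECONDITION & SPEC =====
-- is an 'if TYPE_CHECKING:' block still open (no dedented line after its guard) at end-of-file?
def pvOpenBlock (lines : List (List Char)) : Bool :=
  lines.foldl
    (fun opened l =>
      if opened then decide (l = [] ∨ PySem.List.pyGet? l 0 = some ' ')
      else decide (l = "if TYPE_CHECKING:".toList))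
    false

-- Pre_ excludes exactly the texts on which A raises RuntimeError (a StopIteration escaping its
-- generator, PEP 479): those containing 'TYPE_CHECKING' whose last 'if TYPE_CHECKING:' block runs
-- to end-of-file without a dedented terminating line.
def Pre_remove_type_checking (text : String) : Prop :=
  ¬ (PySem.Str.isIn "TYPE_CHECKING" text = true ∧
     pvOpenBlock (PySem.Chars.splitOn text.toList ['\n']) = true)
instance (text : String) : Decidable (Pre_remove_type_checking text) := by
  unfold Pre_remove_type_checking; infer_instance

def pvWitness_remove_type_checking : String := "a\nif TYPE_CHECKING:\n  import x\nb"

def Spec_remove_type_checking (text : String) (out : String) : Prop := out = remove_type_checking_alt text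
instance (text : String) (out : String) : Decidable (Spec_remove_type_checking text out) := by unfold Spec_remove_type_checking; infer_instance

-- ===== CLAIM (what is proved, stated in full; the proofs are below) =====
def Claim_equal_remove_type_checking : Prop := ∀ (text : String), Dom_remove_type_checking text → Pre_remove_type_checking text → Spec_remove_type_checking text (remove_type_checking text)

-- ===== LEMMAS AND PROOFS =====

-- no guard line at all: A's outer loop keeps every line
theorem pvAOuter_no_guard (lines : List (List Char)) (h : pvGuard ∉ lines) :
    pvAOuter lines = lines := by
  induction lines with
  | nil => rfl
  | cons l rest ih =>
    rw [pvAOuter]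
    have hl : l ≠ pvGuard := fun he => h (he ▸ List.mem_cons_self)
    simp only [if_neg hl]
    rw [ih (fun hm => h (List.mem_cons_of_mem _ hm))]

-- A's outer loop passes the guard-free prefix through and enters skip mode at the first guard
theorem pvAOuter_split (pre suf : List (List Char)) (h : pvGuard ∉ pre) :
    pvAOuter (pre ++ pvGuard :: suf) = pre ++ pvASkip suf := by
  induction pre with
  | nil => rw [List.nil_append, pvAOuter, if_pos rfl, List.nil_append]
  | cons l rest ih =>
    rw [List.cons_append, pvAOuter]
    have hl : l ≠ pvGuard := fun he => h (he ▸ List.mem_cons_self)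
    simp only [if_neg hl]
    rw [ih (fun hm => h (List.mem_cons_of_mem _ hm)), List.cons_append]

-- A's inner skip loop, characterised by the block length B scans for
theorem pvASkip_eq (suf : List (List Char)) :
    pvASkip suf = if pvBlockLen suf = suf.length then []
      else suf.getD (pvBlockLen suf) [] :: pvAOuter (suf.drop (pvBlockLen suf + 1)) := by
  induction suf with
  | nil => rfl
  | cons l rest ih =>
    rw [pvASkip]
    by_cases hb : l = [] ∨ PySem.List.pyGet? l 0 = some ' '
    · have hA : ¬ (l ≠ [] ∧ PySem.List.pyGet? l 0 ≠ some ' ') := by tauto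
      rw [if_neg hA, ih]
      have hk : pvBlockLen (l :: rest) = pvBlockLen rest + 1 := by rw [pvBlockLen, if_pos hb]
      simp only [hk, List.length_cons, Nat.add_right_cancel_iff]
      split_ifs with h
      · rfl
      · simp [List.getD]
    · have hA : l ≠ [] ∧ PySem.List.pyGet? l 0 ≠ some ' ' := by tauto
      rw [if_pos hA]
      have hk : pvBlockLen (l :: rest) = 0 := by rw [pvBlockLen, if_neg hb]
      simp [hk]

-- main loop equivalence, by strong induction on the number of lines
theorem pvStrip_eq (n : ℕ) : ∀ lines : List (List Char), lines.length ≤ n →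
    pvAOuter lines = pvBStrip lines := by
  induction n with
  | zero =>
    intro lines hlen
    have : lines = [] := List.eq_nil_of_length_eq_zero (Nat.le_zero.mp hlen)
    subst this
    rw [pvBStrip]
    split
    next => rfl
    next j hidx => simp [PySem.List.index?_eq_idxOf?, List.idxOf?] at hidx
  | succ n ih =>
    intro lines hlen
    rw [pvBStrip]
    split
    next hidx =>
      exact pvAOuter_no_guard lines ((PySem.List.index?_eq_none_iff _ _).mp hidx)
    next j hidx =>
      obtain ⟨pre, suf, hsplit, hj, hnot⟩ := (PySem.List.index?_eq_some_iff _ _ _).mp hidx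
      subst hsplit; subst hj
      have htake : (pre ++ pvGuard :: suf).take pre.length = pre := List.take_left
      have hdrop : (pre ++ pvGuard :: suf).drop (pre.length + 1) = suf := by
        rw [show pre.length + 1 = pre.length + 1 from rfl, ← List.drop_drop,
            List.drop_left, List.drop_one, List.tail_cons]
      simp only [htake, hdrop]
      rw [pvAOuter_split pre suf hnot, pvASkip_eq]
      split_ifs with h
      · simp
      · rw [ih (suf.drop (pvBlockLen suf + 1)) (by
          have h1 : (pre ++ pvGuard :: suf).length = pre.length + suf.length + 1 := by
            simp; omega
          simp only [List.length_drop]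
          omega)]
        simp

-- ===== VERDICT (by name: the statement is the Claim_ definition above) =====
theorem remove_type_checking_spec : Claim_equal_remove_type_checking := by
  intro text _ _
  unfold Spec_remove_type_checking remove_type_checking remove_type_checking_alt
  split_ifs with h
  · rfl
  · rw [pvStrip_eq (PySem.Chars.splitOn text.toList ['\n']).length _ le_rfl]
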